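-- pv_equiv track=rewrite | github.com/JamesKamau-5773/unda-youth-network-backend | blueprints/supervisor.py | _looks_technical_error
-- ===== SOURCE A (Python) =====
-- def _looks_technical_error(message: str) -> bool:
--   text = (message or '').lower()
--   technical_markers = (
--     'traceback',
--     'sqlalchemy',
--     'psycopg2',
--     'integrityerror',
--     'operationalerror',
--     'programmingerror',
--     'database',
--     'constraint',
--     'null value',
--     'foreign key',
--     '[sql:',
--     'error changing',
--     'error updating',
--     'error deleting',
--     'error creating',
--   )
--   return any(marker in text for marker in technical_markers)
-- ===== SOURCE B (Python) =====
-- _MARKERS = (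
--     'traceback',
--     'sqlalchemy',
--     'psycopg2',
--     'integrityerror',
--     'operationalerror',
--     'programmingerror',
--     'database',
--     'constraint',
--     'null value',
--     'foreign key',
--     '[sql:',
--     'error changing',
--     'error updating',
--     'error deleting',
--     'error creating',
-- )
--
--
-- def _looks_technical_error(message: str) -> bool:
--     text = (message or '').lower()
--     # single left-to-right scan over positions: at each index, check whether
--     # some marker starts right there
--     return any(
--         text.startswith(marker, i)
--         for i in range(len(text))
--         for marker in _MARKERS
--     )
-- ===== Notes on version B (the rewrite author's own statement) =====
-- stated objective: alternative
-- what changed: A iterates over the markers, each tested by its own full substring scan of the text; B makes a single left-to-right scan over text positions and at each position checks whether some marker starts right there via str.startswith with a start index.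
import Mathlib
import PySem

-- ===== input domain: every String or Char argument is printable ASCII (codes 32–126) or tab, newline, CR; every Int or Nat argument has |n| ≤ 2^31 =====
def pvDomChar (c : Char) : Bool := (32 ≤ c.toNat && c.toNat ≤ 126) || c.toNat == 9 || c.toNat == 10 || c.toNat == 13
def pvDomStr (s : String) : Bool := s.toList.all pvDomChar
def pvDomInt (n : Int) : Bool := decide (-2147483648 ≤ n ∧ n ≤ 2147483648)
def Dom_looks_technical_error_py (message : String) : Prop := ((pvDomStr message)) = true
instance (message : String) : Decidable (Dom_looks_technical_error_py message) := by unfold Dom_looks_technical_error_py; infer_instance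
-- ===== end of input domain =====

-- B replaces A's per-marker substring tests by one left-to-right scan over text
-- positions checking which marker starts there (alternative decomposition, same cost class).

-- ===== PORT A =====
-- the tuple of technical markers (identical literal tuple in A and in Source B)
def pvMarkersA : List (List Char) :=
  [ "traceback".toList, "sqlalchemy".toList, "psycopg2".toList, "integrityerror".toList,
    "operationalerror".toList, "programmingerror".toList, "database".toList, "constraint".toList,
    "null value".toList, "foreign key".toList, "[sql:".toList, "error changing".toList,
    "error updating".toList, "error deleting".toList, "error creating".toList ]

-- port of A: text = (message or '').lower(); any(marker in text for marker in markers)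
def looks_technical_error_py (message : String) : Bool :=
  let text := PySem.Chars.lower (if message.toList = [] then [] else message.toList)
  pvMarkersA.any (fun marker => PySem.Chars.isIn marker text)

-- ===== PORT B =====
-- the same literal tuple of markers, as written in Source B
def pvMarkersB : List (List Char) := pvMarkersA

-- port of B: one scan over positions i; text.startswith(marker, i) is ported as
-- startswith on text.drop i (exact for 0 <= i <= len(text))
def looks_technical_error_py_alt (message : String) : Bool :=
  let text := PySem.Chars.lower (if message.toList = [] then [] else message.toList)
  (List.range text.length).any (fun i =>
    pvMarkersB.any (fun marker => PySem.Chars.startswith (text.drop i) marker))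

-- ===== PRECONDITION & SPEC =====
def Spec_looks_technical_error_py (message : String) (out : Bool) : Prop := out = looks_technical_error_py_alt message
instance (message : String) (out : Bool) : Decidable (Spec_looks_technical_error_py message out) := by unfold Spec_looks_technical_error_py; infer_instance

-- ===== CLAIM (what is proved, stated in full; the proofs are below) =====
def Claim_equal_looks_technical_error_py : Prop := ∀ (message : String), Dom_looks_technical_error_py message → Spec_looks_technical_error_py message (looks_technical_error_py message)

-- ===== LEMMAS AND PROOFS =====


-- every marker is nonempty, so an occurrence starts strictly before the end of the text
lemma pvMarkersA_ne_nil : ∀ m ∈ pvMarkersA, m ≠ ([] : List Char) := by decide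

-- for a nonempty pattern, "occurs somewhere" = "starts at some position < length"
lemma pvInfix_iff_bounded (m t : List Char) (hm : m ≠ []) :
    (∃ i, i < t.length ∧ m <+: t.drop i) ↔ PySem.Chars.isIn m t = true := by
  rw [← PySem.Chars.exists_prefix_drop_iff_isIn]
  constructor
  · rintro ⟨i, _, hi⟩; exact ⟨i, hi⟩
  · rintro ⟨j, hj⟩
    by_cases h : j < t.length
    · exact ⟨j, h, hj⟩
    · exfalso
      rw [List.drop_eq_nil_of_le (Nat.le_of_not_lt h)] at hj
      exact hm (List.prefix_nil.mp hj)

-- the two scans agree on any text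
lemma pvScan_eq (t : List Char) :
    pvMarkersA.any (fun marker => PySem.Chars.isIn marker t) =
      (List.range t.length).any (fun i =>
        pvMarkersB.any (fun marker => PySem.Chars.startswith (t.drop i) marker)) := by
  have hBA : pvMarkersB = pvMarkersA := rfl
  rw [hBA, Bool.eq_iff_iff]
  simp only [List.any_eq_true, List.mem_range, PySem.Chars.startswith_iff]
  constructor
  · rintro ⟨m, hm, hin⟩
    obtain ⟨i, hi, hpre⟩ := (pvInfix_iff_bounded m t (pvMarkersA_ne_nil m hm)).mpr hin
    exact ⟨i, hi, m, hm, hpre⟩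
  · rintro ⟨i, hi, m, hm, hpre⟩
    exact ⟨m, hm, (pvInfix_iff_bounded m t (pvMarkersA_ne_nil m hm)).mp ⟨i, hi, hpre⟩⟩

-- ===== VERDICT (by name: the statement is the Claim_ definition above) =====
theorem looks_technical_error_py_spec : Claim_equal_looks_technical_error_py := by
  intro message _
  unfold Spec_looks_technical_error_py looks_technical_error_py looks_technical_error_py_alt
  exact pvScan_eq _
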